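-- pv_equiv track=rewrite | github.com/JeongGod/Algo-study | leehyowonzero/13week/87390.py | solution
-- ===== SOURCE A (Python) =====
-- def solution(n, left, right):
--     answer = []
--     start_row, start_col = left // n, left % n
--     end_row, end_col = right // n, right % n
--     i = start_row
--     j = start_col
--     while True:
--         idx = max(i, j) + 1
--         answer.append(idx)
--         if(i == end_row and j == end_col):
--             break
--         j += 1
--         if(j == n):
--             j = 0
--             i += 1
--     return answer
-- ===== SOURCE B (Python) =====
-- def solution(n, left, right):
--     # Blockwise construction: walk the rows of the grid; within a row the values
--     # are a constant block (r+1 while the column index is <= r) followed by an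
--     # arithmetic ramp (j+1 for columns j > r), so each row is emitted as a
--     # replicated block plus a range -- no per-element max or coordinate tracking.
--     out = []
--     r0, c0 = divmod(left, n)
--     r1, c1 = divmod(right, n)
--     for r in range(r0, r1 + 1):
--         a = c0 if r == r0 else 0
--         b = c1 + 1 if r == r1 else n
--         flat = min(b, r + 1)
--         if a < flat:
--             out += [r + 1] * (flat - a)
--         out += list(range(max(a, r + 1) + 1, b + 1))
--     return out
-- ===== Notes on version B (the rewrite author's own statement) =====
-- stated objective: alternative
-- what changed: Replaces A's per-cell while-loop that carries mutable (i,j) coordinates with a blockwise row construction: each grid row is emitted as a replicated constant block plus an arithmetic ramp (list repetition and range()), so no per-element max or coordinate stepping happens at all.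
-- outside the precondition, e.g. on solution(-2, 0, 0): A returns [1], B returns [1]; on solution(0, 0, 0): A raises ZeroDivisionError, B raises ZeroDivisionError; on solution(3, 5, 2): A does not finish within the time limit, B returns []
import Mathlib
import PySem

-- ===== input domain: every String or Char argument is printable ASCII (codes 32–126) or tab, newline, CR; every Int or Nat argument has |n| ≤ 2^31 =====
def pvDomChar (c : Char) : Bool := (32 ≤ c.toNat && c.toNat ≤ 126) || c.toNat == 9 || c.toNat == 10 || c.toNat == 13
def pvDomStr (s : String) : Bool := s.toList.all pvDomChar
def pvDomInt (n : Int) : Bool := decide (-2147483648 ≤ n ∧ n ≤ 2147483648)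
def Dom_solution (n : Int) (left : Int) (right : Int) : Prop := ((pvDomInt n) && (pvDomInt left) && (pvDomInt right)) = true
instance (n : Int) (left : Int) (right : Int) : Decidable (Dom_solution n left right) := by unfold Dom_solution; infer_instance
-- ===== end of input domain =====

-- B replaces A's per-cell while-loop carrying (i,j) state by a blockwise row construction:
-- each grid row is emitted as a replicated constant block plus an arithmetic ramp
-- (objective: simpler decomposition; return value only, no mutation involved).

-- ===== PORT A =====
-- A's while-loop; fuel only makes the loop total (Pre_ guarantees it is never exhausted).
def solLoopA (n endRow endCol : Int) : Nat → Int → Int → List Int → List Int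
  | 0, _, _, acc => acc.reverse
  | fuel + 1, i, j, acc =>
      let acc' := (max i j + 1) :: acc
      if i = endRow ∧ j = endCol then acc'.reverse
      else if j + 1 = n then solLoopA n endRow endCol fuel (i + 1) 0 acc'
      else solLoopA n endRow endCol fuel i (j + 1) acc'

def solution (n : Int) (left : Int) (right : Int) : List Int :=
  let startRow := PySem.Int.floordiv left n
  let startCol := PySem.Int.mod left n
  let endRow := PySem.Int.floordiv right n
  let endCol := PySem.Int.mod right n
  solLoopA n endRow endCol ((right - left).toNat + 1) startRow startCol []

-- ===== PORT B =====
-- one row of B's output: constant block (columns ≤ r) then arithmetic ramp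
def rowOut (r a b : Int) (out : List Int) : List Int :=
  (if a < min b (r + 1) then out ++ List.replicate (min b (r + 1) - a).toNat (r + 1) else out) ++
    PySem.List.pyRange (max a (r + 1) + 1) (b + 1) 1

-- one iteration of B's row loop: pick this row's column bounds, emit block + ramp
def stepB (n r0 c0 r1 c1 : Int) (out : List Int) (r : Int) : List Int :=
  rowOut r (if r = r0 then c0 else 0) (if r = r1 then c1 + 1 else n) out

def solution_alt (n : Int) (left : Int) (right : Int) : List Int :=
  let r0 := PySem.Int.floordiv left n
  let c0 := PySem.Int.mod left n
  let r1 := PySem.Int.floordiv right n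
  let c1 := PySem.Int.mod right n
  (PySem.List.pyRange r0 (r1 + 1) 1).foldl (stepB n r0 c0 r1 c1) []

-- ===== PRECONDITION & SPEC =====
-- Pre_ restricts to the natural domain of the task (a positive grid size n and a
-- non-empty index range): A raises ZeroDivisionError for n = 0, and for n < 0 or
-- left > right its while-loop diverges except in degenerate same-row cases with n < 0,
-- where it still terminates; on those B returns the same value (see cites).
def Pre_solution (n : Int) (left : Int) (right : Int) : Prop := 1 ≤ n ∧ left ≤ right
instance (n : Int) (left : Int) (right : Int) : Decidable (Pre_solution n left right) := by
  unfold Pre_solution; infer_instance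

def pvWitness_solution : Int × Int × Int := (3, 2, 5)

def Spec_solution (n : Int) (left : Int) (right : Int) (out : List Int) : Prop :=
  out = solution_alt n left right
instance (n : Int) (left : Int) (right : Int) (out : List Int) : Decidable (Spec_solution n left right out) := by
  unfold Spec_solution; infer_instance

-- ===== CLAIM (what is proved, stated in full; the proofs are below) =====
def Claim_equal_solution : Prop := ∀ (n : Int) (left : Int) (right : Int),
  Dom_solution n left right → Pre_solution n left right →
  Spec_solution n left right (solution n left right)

-- ===== LEMMAS AND PROOFS =====

-- the flat-index value both programs compute per cell
def fIdx (n k : Int) : Int := max (PySem.Int.floordiv k n) (PySem.Int.mod k n) + 1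

-- ---------- A side: the while-loop produces the flat map ----------

-- stepping the flat index: row/column of c+1 from those of c
theorem floordiv_mod_succ (n c : Int) (hn : 0 < n) :
    (PySem.Int.mod c n + 1 = n →
      PySem.Int.floordiv (c+1) n = PySem.Int.floordiv c n + 1 ∧ PySem.Int.mod (c+1) n = 0) ∧
    (PySem.Int.mod c n + 1 ≠ n →
      PySem.Int.floordiv (c+1) n = PySem.Int.floordiv c n ∧
      PySem.Int.mod (c+1) n = PySem.Int.mod c n + 1) := by
  have h1 := PySem.Int.floordiv_mul_add_mod c n
  have h2 := PySem.Int.floordiv_mul_add_mod (c+1) n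
  have hm0 := PySem.Int.mod_nonneg c hn
  have hml := PySem.Int.mod_lt c hn
  have hm0' := PySem.Int.mod_nonneg (c+1) hn
  have hml' := PySem.Int.mod_lt (c+1) hn
  have e1 : (PySem.Int.floordiv c n + 1) * n = PySem.Int.floordiv c n * n + n := by ring
  have e2 : (PySem.Int.floordiv c n + 1 + 1) * n = PySem.Int.floordiv c n * n + n + n := by ring
  constructor
  · intro hw
    have hq : PySem.Int.floordiv (c+1) n = PySem.Int.floordiv c n + 1 := by
      rw [PySem.Int.floordiv_eq_iff_of_pos hn]
      constructor <;> linarith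
    refine ⟨hq, ?_⟩
    rw [hq] at h2; linarith
  · intro hw
    have hq : PySem.Int.floordiv (c+1) n = PySem.Int.floordiv c n := by
      rw [PySem.Int.floordiv_eq_iff_of_pos hn]
      constructor <;> linarith [lt_of_le_of_ne (by linarith : PySem.Int.mod c n + 1 ≤ n) hw]
    refine ⟨hq, ?_⟩
    rw [hq] at h2; linarith

theorem loop_eq (n r : Int) (hn : 0 < n) :
    ∀ (fuel : Nat) (c : Int) (acc : List Int), c ≤ r → (r - c).toNat < fuel →
    solLoopA n (PySem.Int.floordiv r n) (PySem.Int.mod r n) fuel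
      (PySem.Int.floordiv c n) (PySem.Int.mod c n) acc
    = acc.reverse ++ (PySem.List.pyRange c (r + 1) 1).map (fIdx n) := by
  intro fuel
  induction fuel with
  | zero => intro c acc _ hf; omega
  | succ fuel ih =>
    intro c acc hcr _
    rw [PySem.List.pyRange_one_cons (by omega)]
    simp only [solLoopA]
    by_cases hend : PySem.Int.floordiv c n = PySem.Int.floordiv r n ∧
                    PySem.Int.mod c n = PySem.Int.mod r n
    · have hcr' : c = r := by
        have h1 := PySem.Int.floordiv_mul_add_mod c n
        have h2 := PySem.Int.floordiv_mul_add_mod r n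
        rw [hend.1, hend.2] at h1; omega
      subst hcr'
      rw [if_pos hend, PySem.List.pyRange_one_eq_nil (by omega)]
      simp [fIdx]
    · rw [if_neg hend]
      have hcr2 : c < r := by
        rcases lt_or_eq_of_le hcr with h | h
        · exact h
        · exact absurd (by rw [h]; exact ⟨rfl, rfl⟩) hend
      have hstep := floordiv_mod_succ n c hn
      by_cases hw : PySem.Int.mod c n + 1 = n
      · rw [if_pos hw]
        obtain ⟨hq, hm⟩ := hstep.1 hw
        have := ih (c+1) ((max (PySem.Int.floordiv c n) (PySem.Int.mod c n) + 1) :: acc)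
          (by omega) (by omega)
        rw [hq, hm] at this
        rw [this]; simp [fIdx]
      · rw [if_neg hw]
        obtain ⟨hq, hm⟩ := hstep.2 hw
        have := ih (c+1) ((max (PySem.Int.floordiv c n) (PySem.Int.mod c n) + 1) :: acc)
          (by omega) (by omega)
        rw [hq, hm] at this
        rw [this]; simp [fIdx]

-- ---------- B side: the row blocks tile the flat map ----------

theorem pyRange_shift (c a b : Int) :
    PySem.List.pyRange (c + a) (c + b) 1 = (PySem.List.pyRange a b 1).map (fun j => c + j) := by
  rw [PySem.List.pyRange_one, PySem.List.pyRange_one, List.map_map]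
  have h : c + b - (c + a) = b - a := by ring
  rw [h]
  refine List.map_congr_left ?_
  intro k _
  simp [Function.comp]
  ring

theorem rowOut_append (r a b : Int) (out : List Int) :
    rowOut r a b out = out ++ rowOut r a b [] := by
  unfold rowOut
  split <;> simp

-- one row, columns [a, b): the flat-map values are exactly B's block-plus-ramp
theorem row_map (n r a b : Int) (hn : 0 < n) (ha : 0 ≤ a) (hab : a ≤ b) (hb : b ≤ n) :
    (PySem.List.pyRange (r * n + a) (r * n + b) 1).map (fIdx n) = rowOut r a b [] := by
  unfold rowOut
  simp only [List.nil_append]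
  rw [pyRange_shift (r * n) a b, List.map_map]
  have hcell : (PySem.List.pyRange a b 1).map (fIdx n ∘ fun j => r * n + j)
      = (PySem.List.pyRange a b 1).map (fun j => max r j + 1) := by
    refine List.map_congr_left ?_
    intro j hj
    rw [PySem.List.mem_pyRange_one] at hj
    have hj0 : 0 ≤ j := by omega
    have hjn : j < n := by omega
    have hq : PySem.Int.floordiv (r * n + j) n = r := by
      rw [PySem.Int.floordiv_eq_iff_of_pos hn]
      constructor
      · omega
      · have : (r + 1) * n = r * n + n := by ring
        omega
    have hmod := PySem.Int.floordiv_mul_add_mod (r * n + j) n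
    rw [hq] at hmod
    have hm : PySem.Int.mod (r * n + j) n = j := by omega
    simp [fIdx, Function.comp, hq, hm]
  rw [hcell]
  have hm1 : a ≤ min b (max a (r + 1)) := by omega
  have hm2 : min b (max a (r + 1)) ≤ b := by omega
  rw [PySem.List.pyRange_one_append a (min b (max a (r + 1))) b hm1 hm2, List.map_append]
  congr 1
  · -- constant block
    by_cases hlt : a < min b (r + 1)
    · rw [if_pos hlt]
      have hmeq : min b (max a (r + 1)) = min b (r + 1) := by omega
      rw [hmeq]
      refine List.eq_replicate_iff.mpr ⟨?_, ?_⟩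
      · simp [PySem.List.length_pyRange_one]
      · intro x hx
        simp only [List.mem_map] at hx
        obtain ⟨j, hj, rfl⟩ := hx
        rw [PySem.List.mem_pyRange_one] at hj
        have : max r j = r := by omega
        rw [this]
    · rw [if_neg hlt]
      have : min b (max a (r + 1)) ≤ a := by omega
      rw [PySem.List.pyRange_one_eq_nil this]
      simp
  · -- ramp
    by_cases hsb : max a (r + 1) ≤ b
    · have hmeq : min b (max a (r + 1)) = max a (r + 1) := by omega
      rw [hmeq]
      have h1 : max a (r + 1) + 1 = 1 + max a (r + 1) := by ring
      have h2 : b + 1 = 1 + b := by ring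
      rw [h1, h2, pyRange_shift 1 (max a (r + 1)) b]
      refine List.map_congr_left ?_
      intro j hj
      rw [PySem.List.mem_pyRange_one] at hj
      have : max r j = j := by omega
      rw [this]; ring
    · have hmeq : min b (max a (r + 1)) = b := by omega
      rw [hmeq, PySem.List.pyRange_one_eq_nil (le_refl b),
        PySem.List.pyRange_one_eq_nil (by omega : b + 1 ≤ max a (r + 1) + 1)]
      simp

theorem stepB_append (n r0 c0 r1 c1 : Int) (out : List Int) (r : Int) :
    stepB n r0 c0 r1 c1 out r = out ++ stepB n r0 c0 r1 c1 [] r := by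
  unfold stepB
  exact rowOut_append _ _ _ _

-- rows strictly after the first: concatenating the row blocks gives the flat map
theorem fold_tail (n r0 c0 r1 c1 : Int) (hn : 0 < n) (hc1 : 0 ≤ c1) (hc1n : c1 < n) :
    ∀ (fuel : Nat) (r : Int) (acc : List Int), r0 < r → r ≤ r1 + 1 → (r1 + 1 - r).toNat ≤ fuel →
    (PySem.List.pyRange r (r1 + 1) 1).foldl (stepB n r0 c0 r1 c1) acc
      = acc ++ (PySem.List.pyRange (r * n) (r1 * n + c1 + 1) 1).map (fIdx n) := by
  intro fuel
  induction fuel with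
  | zero =>
    intro r acc h0 h1 hf
    have hr : r = r1 + 1 := by omega
    subst hr
    rw [PySem.List.pyRange_one_eq_nil (le_refl _)]
    have : (r1 + 1) * n = r1 * n + n := by ring
    rw [PySem.List.pyRange_one_eq_nil (by omega)]
    simp
  | succ fuel ih =>
    intro r acc h0 h1 hf
    rcases eq_or_lt_of_le h1 with hr | hr
    · subst hr
      rw [PySem.List.pyRange_one_eq_nil (le_refl _)]
      have : (r1 + 1) * n = r1 * n + n := by ring
      rw [PySem.List.pyRange_one_eq_nil (by omega)]
      simp
    · have hrle : r ≤ r1 := by omega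
      rw [PySem.List.pyRange_one_cons (by omega), List.foldl_cons, stepB_append]
      by_cases hlast : r = r1
      · rw [PySem.List.pyRange_one_eq_nil (by omega : r1 + 1 ≤ r + 1), List.foldl_nil]
        have hrow := row_map n r 0 (c1 + 1) hn (le_refl 0) (by omega) (by omega)
        rw [add_zero] at hrow
        have hbody : stepB n r0 c0 r1 c1 [] r
            = (PySem.List.pyRange (r * n) (r * n + (c1 + 1)) 1).map (fIdx n) := by
          unfold stepB
          rw [if_neg (by omega : ¬ r = r0), if_pos hlast, hrow]
        rw [hbody]
        have : r * n + (c1 + 1) = r1 * n + c1 + 1 := by rw [hlast]; ring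
        rw [this]
      · have hrlt : r < r1 := by omega
        have hrow := row_map n r 0 n hn (le_refl 0) (by omega) (le_refl n)
        rw [add_zero] at hrow
        have hbody : stepB n r0 c0 r1 c1 [] r
            = (PySem.List.pyRange (r * n) (r * n + n) 1).map (fIdx n) := by
          unfold stepB
          rw [if_neg (by omega : ¬ r = r0), if_neg hlast, hrow]
        rw [hbody]
        have hstep := ih (r + 1) (acc ++ (PySem.List.pyRange (r * n) (r * n + n) 1).map (fIdx n))
          (by omega) (by omega) (by omega)
        rw [hstep, List.append_assoc]
        congr 1
        have hsplit : PySem.List.pyRange (r * n) (r1 * n + c1 + 1) 1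
            = PySem.List.pyRange (r * n) (r * n + n) 1
              ++ PySem.List.pyRange (r * n + n) (r1 * n + c1 + 1) 1 := by
          refine PySem.List.pyRange_one_append _ _ _ (by omega) ?_
          have h1 : r * n + n = (r + 1) * n := by ring
          have h2 : (r + 1) * n ≤ r1 * n :=
            mul_le_mul_of_nonneg_right (by omega) (by omega)
          omega
        rw [hsplit, List.map_append]
        congr 2
        have : (r + 1) * n = r * n + n := by ring
        rw [this]

theorem alt_eq (n left right : Int) (hn : 0 < n) (hlr : left ≤ right) :
    solution_alt n left right = (PySem.List.pyRange left (right + 1) 1).map (fIdx n) := by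
  unfold solution_alt
  simp only []
  have hq0 := PySem.Int.floordiv_mul_add_mod left n
  have hq1 := PySem.Int.floordiv_mul_add_mod right n
  have hc00 := PySem.Int.mod_nonneg left hn
  have hc0n := PySem.Int.mod_lt left hn
  have hc10 := PySem.Int.mod_nonneg right hn
  have hc1n := PySem.Int.mod_lt right hn
  set r0 := PySem.Int.floordiv left n with hr0
  set c0 := PySem.Int.mod left n with hc0
  set r1 := PySem.Int.floordiv right n with hr1
  set c1 := PySem.Int.mod right n with hc1
  have hrr : r0 ≤ r1 := by
    by_contra hlt
    have : (r1 + 1) * n ≤ r0 * n := mul_le_mul_of_nonneg_right (by omega) (by omega)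
    have h' : (r1 + 1) * n = r1 * n + n := by ring
    omega
  rw [PySem.List.pyRange_one_cons (by omega), List.foldl_cons, stepB_append, List.nil_append]
  by_cases hone : r0 = r1
  · rw [PySem.List.pyRange_one_eq_nil (by omega), List.foldl_nil]
    have hcc : c0 ≤ c1 + 1 := by
      have : r0 * n = r1 * n := by rw [hone]
      omega
    have hrow := row_map n r0 c0 (c1 + 1) hn (by omega) hcc (by omega)
    have hbody : stepB n r0 c0 r1 c1 [] r0
        = (PySem.List.pyRange (r0 * n + c0) (r0 * n + (c1 + 1)) 1).map (fIdx n) := by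
      unfold stepB
      rw [if_pos rfl, if_pos hone, hrow]
    have hR : r0 * n + (c1 + 1) = right + 1 := by
      have : r0 * n = r1 * n := by rw [hone]
      omega
    rw [hbody, hq0, hR]
  · have hrlt : r0 < r1 := by omega
    have hrow := row_map n r0 c0 n hn (by omega) (by omega) (le_refl n)
    have hbody : stepB n r0 c0 r1 c1 [] r0
        = (PySem.List.pyRange (r0 * n + c0) (r0 * n + n) 1).map (fIdx n) := by
      unfold stepB
      rw [if_pos rfl, if_neg hone, hrow]
    rw [hbody]
    rw [fold_tail n r0 c0 r1 c1 hn (by omega) (by omega) (r1 - r0).toNat (r0 + 1)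
      ((PySem.List.pyRange (r0 * n + c0) (r0 * n + n) 1).map (fIdx n)) (by omega) (by omega) (by omega)]
    have hsplit : PySem.List.pyRange left (right + 1) 1
        = PySem.List.pyRange left (r0 * n + n) 1 ++ PySem.List.pyRange (r0 * n + n) (right + 1) 1 := by
      refine PySem.List.pyRange_one_append _ _ _ (by omega) ?_
      have h1 : r0 * n + n = (r0 + 1) * n := by ring
      have h2 : (r0 + 1) * n ≤ r1 * n := mul_le_mul_of_nonneg_right (by omega) (by omega)
      omega
    have hE : (r0 + 1) * n = r0 * n + n := by ring
    have hRend : r1 * n + c1 + 1 = right + 1 := by omega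
    rw [hE, hRend, hsplit, List.map_append, hq0]

-- ===== VERDICT (by name: the statement is the Claim_ definition above) =====
theorem solution_spec : Claim_equal_solution := by
  intro n left right _ hpre
  obtain ⟨hn, hlr⟩ := hpre
  unfold Spec_solution solution
  rw [alt_eq n left right (by omega) hlr]
  simpa using loop_eq n right (by omega) ((right - left).toNat + 1) left [] hlr (by omega)
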